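-- pv_equiv track=rewrite | github.com/KBS-Labs/dataknobs | packages/bots/src/dataknobs_bots/rubrics/meta.py | check_criteria_independence
-- ===== SOURCE A (Python) =====
-- from typing import Any
--
-- def check_criteria_independence(content: dict[str, Any]) -> str:
--     """Check that no two criteria have identical names or descriptions.
--
--     Returns:
--         ``"pass"`` if all names and descriptions are unique.
--         ``"partial"`` if names are unique but descriptions overlap.
--         ``"fail"`` if any criterion names are duplicated.
--     """
--     criteria = content.get("criteria", [])
--     if len(criteria) <= 1:
--         return "pass"
--
--     names = [c.get("name", "") for c in criteria]
--     descriptions = [c.get("description", "") for c in criteria]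
--
--     if len(names) != len(set(names)):
--         return "fail"
--
--     if len(descriptions) != len(set(descriptions)):
--         return "partial"
--
--     return "pass"
-- ===== SOURCE B (Python) =====
-- def check_criteria_independence(content):
--     criteria = content.get("criteria", [])
--     if len(criteria) <= 1:
--         return "pass"
--     seen_names = set()
--     seen_descs = set()
--     desc_dup = False
--     for c in criteria:
--         n = c.get("name", "")
--         d = c.get("description", "")
--         if n in seen_names:
--             return "fail"
--         seen_names.add(n)
--         if d in seen_descs:
--             desc_dup = True
--         else:
--             seen_descs.add(d)
--     return "partial" if desc_dup else "pass"
-- ===== Notes on version B (the rewrite author's own statement) =====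
-- stated objective: alternative
-- what changed: Replaces the two full list comprehensions plus len(set(...)) comparisons by a single pass over criteria that maintains seen-name and seen-description sets, returning 'fail' early on the first duplicate name and tracking a description-duplicate flag.
import Mathlib
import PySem

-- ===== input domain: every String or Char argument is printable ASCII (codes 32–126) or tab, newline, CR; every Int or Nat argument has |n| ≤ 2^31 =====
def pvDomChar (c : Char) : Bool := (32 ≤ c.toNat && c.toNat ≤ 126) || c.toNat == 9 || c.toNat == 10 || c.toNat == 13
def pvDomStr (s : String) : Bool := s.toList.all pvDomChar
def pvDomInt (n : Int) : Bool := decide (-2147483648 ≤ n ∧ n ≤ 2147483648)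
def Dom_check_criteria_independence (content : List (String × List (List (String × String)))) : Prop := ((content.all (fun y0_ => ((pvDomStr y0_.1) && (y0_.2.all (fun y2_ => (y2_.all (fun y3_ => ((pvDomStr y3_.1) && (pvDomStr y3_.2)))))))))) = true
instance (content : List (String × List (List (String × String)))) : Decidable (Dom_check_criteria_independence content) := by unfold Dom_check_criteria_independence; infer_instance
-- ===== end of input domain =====

-- B is an alternative single-pass implementation (same O(n) cost, early exit on the first duplicate name).

-- ===== PORT A =====
def check_criteria_independence (content : List (String × List (List (String × String)))) : String :=
  let criteria := PySem.Dict.getD (PySem.Dict.mk content) "criteria" []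
  if criteria.length ≤ 1 then "pass"
  else
    let names := criteria.map (fun c => PySem.Dict.getD (PySem.Dict.mk c) "name" "")
    let descriptions := criteria.map (fun c => PySem.Dict.getD (PySem.Dict.mk c) "description" "")
    if names.length ≠ (PySem.Set.ofList names).length then "fail"
    else if descriptions.length ≠ (PySem.Set.ofList descriptions).length then "partial"
    else "pass"

-- ===== PORT B =====
-- the single pass of Source B: seen-name / seen-description sets and the desc_dup flag
def cciLoop (cs : List (List (String × String)))
    (seenNames seenDescs : PySem.Set String) (descDup : Bool) : String :=
  match cs with
  | [] => if descDup then "partial" else "pass"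
  | c :: rest =>
    let n := PySem.Dict.getD (PySem.Dict.mk c) "name" ""
    let d := PySem.Dict.getD (PySem.Dict.mk c) "description" ""
    if PySem.Set.contains seenNames n then "fail"
    else if PySem.Set.contains seenDescs d then
      cciLoop rest (PySem.Set.add seenNames n) seenDescs true
    else
      cciLoop rest (PySem.Set.add seenNames n) (PySem.Set.add seenDescs d) descDup

def check_criteria_independence_alt (content : List (String × List (List (String × String)))) : String :=
  let criteria := PySem.Dict.getD (PySem.Dict.mk content) "criteria" []
  if criteria.length ≤ 1 then "pass"
  else cciLoop criteria PySem.Set.empty PySem.Set.empty false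

-- ===== PRECONDITION & SPEC =====
def Spec_check_criteria_independence (content : List (String × List (List (String × String)))) (out : String) : Prop := out = check_criteria_independence_alt content
instance (content : List (String × List (List (String × String)))) (out : String) : Decidable (Spec_check_criteria_independence content out) := by unfold Spec_check_criteria_independence; infer_instance

-- ===== CLAIM (what is proved, stated in full; the proofs are below) =====
def Claim_equal_check_criteria_independence : Prop := ∀ (content : List (String × List (List (String × String)))), Dom_check_criteria_independence content → Spec_check_criteria_independence content (check_criteria_independence content)

-- ===== LEMMAS AND PROOFS =====

-- "a duplicate appears while scanning xs with the elements of seen already seen"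
def hasDupFrom (xs : List String) (seen : PySem.Set String) : Bool :=
  match xs with
  | [] => false
  | x :: r => PySem.Set.contains seen x || hasDupFrom r (PySem.Set.add seen x)

lemma hasDupFrom_eq_false_iff (xs : List String) (seen : PySem.Set String) :
    hasDupFrom xs seen = false ↔ xs.Nodup ∧ ∀ x ∈ xs, x ∉ seen := by
  induction xs generalizing seen with
  | nil => simp [hasDupFrom]
  | cons x r ih =>
    by_cases hx : x ∈ seen
    · have hc : PySem.Set.contains seen x = true := (PySem.Set.contains_iff seen x).mpr hx
      simp only [hasDupFrom, hc, Bool.true_or, Bool.true_eq_false, false_iff, not_and]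
      intro _ hall
      exact (hall x (List.mem_cons_self)) hx
    · have hc : PySem.Set.contains seen x = false := by
        cases h : PySem.Set.contains seen x with
        | false => rfl
        | true => exact absurd ((PySem.Set.contains_iff seen x).mp h) hx
      simp only [hasDupFrom, hc, Bool.false_or, ih, List.nodup_cons, List.mem_cons]
      constructor
      · rintro ⟨hn, hall⟩
        refine ⟨⟨fun hm => ?_, hn⟩, ?_⟩
        · exact (hall x hm) ((PySem.Set.mem_add seen x x).mpr (Or.inr rfl))
        · rintro y (rfl | hy)
          · exact hx
          · intro hm; exact (hall y hy) ((PySem.Set.mem_add seen x y).mpr (Or.inl hm))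
      · rintro ⟨⟨hxr, hn⟩, hall⟩
        refine ⟨hn, ?_⟩
        intro y hy hm
        rcases (PySem.Set.mem_add seen x y).mp hm with h | rfl
        · exact (hall y (Or.inr hy)) h
        · exact hxr hy

lemma hasDupFrom_empty_iff (xs : List String) :
    hasDupFrom xs ([] : PySem.Set String) = false ↔ xs.Nodup := by
  simp [hasDupFrom_eq_false_iff]

lemma ofList_length_eq_iff (xs : List String) :
    (PySem.Set.ofList xs).length = xs.length ↔ xs.Nodup := by
  constructor
  · intro h
    have hperm : (PySem.Set.ofList xs).Perm xs.dedup := by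
      refine (List.perm_ext_iff_of_nodup (PySem.Set.nodup_ofList xs) (List.nodup_dedup xs)).mpr ?_
      intro a; simp [PySem.Set.mem_ofList, List.mem_dedup]
    have hlen : xs.dedup.length = xs.length := by
      have := hperm.length_eq; omega
    have heq : xs.dedup = xs := (List.dedup_sublist xs).eq_of_length hlen
    rw [← heq]; exact List.nodup_dedup xs
  · intro h; rw [PySem.Set.ofList_eq_self_of_nodup xs h]

lemma cciLoop_eq (cs : List (List (String × String)))
    (sn sd : PySem.Set String) (dup : Bool) :
    cciLoop cs sn sd dup =
      if hasDupFrom (cs.map (fun c => PySem.Dict.getD (PySem.Dict.mk c) "name" "")) sn = true then "fail"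
      else if (dup || hasDupFrom (cs.map (fun c => PySem.Dict.getD (PySem.Dict.mk c) "description" "")) sd) = true
        then "partial" else "pass" := by
  induction cs generalizing sn sd dup with
  | nil => simp [cciLoop, hasDupFrom]
  | cons c rest ih =>
    simp only [cciLoop, List.map_cons, hasDupFrom]
    by_cases hn : PySem.Set.contains sn (PySem.Dict.getD (PySem.Dict.mk c) "name" "") = true
    · rw [if_pos hn]; simp only [hn]; simp
    · have hn' : PySem.Set.contains sn (PySem.Dict.getD (PySem.Dict.mk c) "name" "") = false := by
        simpa using hn
      rw [if_neg hn]; simp only [hn']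
      simp only [Bool.false_or]
      by_cases hd : PySem.Set.contains sd (PySem.Dict.getD (PySem.Dict.mk c) "description" "") = true
      · rw [if_pos hd, ih]; simp only [hd]
        by_cases hdf : hasDupFrom (rest.map (fun c => PySem.Dict.getD (PySem.Dict.mk c) "name" ""))
            (PySem.Set.add sn (PySem.Dict.getD (PySem.Dict.mk c) "name" "")) = true <;> simp [hdf]
      · have hd' : PySem.Set.contains sd (PySem.Dict.getD (PySem.Dict.mk c) "description" "") = false := by
          simpa using hd
        rw [if_neg hd, ih]; simp only [hd']
        simp

lemma hasDupFrom_empty_true (xs : List String) (h : ¬ xs.Nodup) :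
    hasDupFrom xs ([] : PySem.Set String) = true := by
  cases hc : hasDupFrom xs ([] : PySem.Set String) with
  | true => rfl
  | false => exact absurd ((hasDupFrom_empty_iff xs).mp hc) h

lemma cci_core (names descs : List String) :
    (if names.length ≠ (PySem.Set.ofList names).length then "fail"
     else if descs.length ≠ (PySem.Set.ofList descs).length then "partial"
     else "pass")
    = (if hasDupFrom names ([] : PySem.Set String) = true then "fail"
       else if (false || hasDupFrom descs ([] : PySem.Set String)) = true then "partial" else "pass") := by
  by_cases hndup : names.Nodup
  · have h1 : ¬ names.length ≠ (PySem.Set.ofList names).length := by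
      simp [(ofList_length_eq_iff names).mpr hndup]
    have h2 : hasDupFrom names ([] : PySem.Set String) = false := (hasDupFrom_empty_iff names).mpr hndup
    by_cases hddup : descs.Nodup
    · have d1 : ¬ descs.length ≠ (PySem.Set.ofList descs).length := by
        simp [(ofList_length_eq_iff descs).mpr hddup]
      have d2 : hasDupFrom descs ([] : PySem.Set String) = false := (hasDupFrom_empty_iff descs).mpr hddup
      simp [h1, h2, d1, d2]
    · have d1 : descs.length ≠ (PySem.Set.ofList descs).length := by
        intro h; exact hddup ((ofList_length_eq_iff descs).mp h.symm)
      have d2 := hasDupFrom_empty_true descs hddup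
      simp [h1, h2, d1, d2]
  · have h1 : names.length ≠ (PySem.Set.ofList names).length := by
      intro h; exact hndup ((ofList_length_eq_iff names).mp h.symm)
    have h2 := hasDupFrom_empty_true names hndup
    simp [h1, h2]

lemma cci_main (criteria : List (List (String × String))) :
    (if criteria.length ≤ 1 then "pass"
     else
       let names := criteria.map (fun c => PySem.Dict.getD (PySem.Dict.mk c) "name" "")
       let descriptions := criteria.map (fun c => PySem.Dict.getD (PySem.Dict.mk c) "description" "")
       if names.length ≠ (PySem.Set.ofList names).length then "fail"
       else if descriptions.length ≠ (PySem.Set.ofList descriptions).length then "partial"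
       else "pass")
    = (if criteria.length ≤ 1 then "pass"
       else cciLoop criteria PySem.Set.empty PySem.Set.empty false) := by
  by_cases hlen : criteria.length ≤ 1
  · simp [hlen]
  · simp only [hlen, if_false]
    rw [cciLoop_eq]
    exact cci_core _ _

-- ===== VERDICT (by name: the statement is the Claim_ definition above) =====
theorem check_criteria_independence_spec : Claim_equal_check_criteria_independence := by
  intro content _
  unfold Spec_check_criteria_independence
  simp only [check_criteria_independence, check_criteria_independence_alt]
  exact cci_main _
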